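-- pv_equiv track=rewrite | github.com/SKNETWORKS-FAMILY-AICAMP/SKN16-3st-1Team | src/rag_system.py | _safe_join_texts
-- ===== SOURCE A (Python) =====
-- from typing import List, Dict, Any, Optional, Tuple
--
-- def _safe_join_texts(texts: List[str], max_chars: int = 18000, sep: str = "\n\n") -> str:
--     joined, total = [], 0
--     for t in texts:
--         t = (t or "").strip()
--         if not t:
--             continue
--         add = len(t) + len(sep)
--         if total + add > max_chars:
--             break
--         joined.append(t)
--         total += add
--     return sep.join(joined)
-- ===== SOURCE B (Python) =====
-- def _safe_join_texts(texts, max_chars=18000, sep="\n\n"):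
--     # Stage 1: clean. Stage 2: prefix-sum costs. Stage 3: BINARY SEARCH for the
--     # largest n with prefix[n] <= max_chars (valid since each cost >= 1, so the
--     # prefix sums are strictly increasing and the cut at the first strict
--     # exceedance equals that largest n). Stage 4: join the prefix.
--     cleaned = [s for s in ((t or "").strip() for t in texts) if s]
--     prefix = [0]
--     run = 0
--     for s in cleaned:
--         run += len(s) + len(sep)
--         prefix.append(run)
--     lo, hi = 0, len(cleaned)
--     while lo < hi:
--         mid = (lo + hi + 1) // 2
--         if prefix[mid] <= max_chars:
--             lo = mid
--         else:
--             hi = mid - 1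
--     return sep.join(cleaned[:lo])
-- ===== Notes on version B (the rewrite author's own statement) =====
-- stated objective: alternative
-- what changed: B cleans the list, builds an explicit prefix-sum array of costs, and BINARY-SEARCHES for the largest prefix whose cumulative cost fits the budget (valid because costs are strictly positive, so prefix sums are strictly increasing), then joins that prefix; A is a single greedy accumulate-and-break loop.
import Mathlib
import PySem

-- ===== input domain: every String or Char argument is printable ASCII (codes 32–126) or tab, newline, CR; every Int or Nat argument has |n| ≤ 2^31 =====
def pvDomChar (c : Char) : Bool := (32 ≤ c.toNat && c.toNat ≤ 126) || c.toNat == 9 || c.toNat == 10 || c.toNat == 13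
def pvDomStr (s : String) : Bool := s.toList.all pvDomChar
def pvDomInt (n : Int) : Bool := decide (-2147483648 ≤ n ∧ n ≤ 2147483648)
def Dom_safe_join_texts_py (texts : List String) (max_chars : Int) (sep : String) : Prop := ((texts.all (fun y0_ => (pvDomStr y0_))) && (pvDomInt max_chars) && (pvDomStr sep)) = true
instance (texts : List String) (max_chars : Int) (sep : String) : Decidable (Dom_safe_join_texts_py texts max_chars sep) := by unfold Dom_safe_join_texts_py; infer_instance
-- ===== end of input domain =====

-- B replaces A's greedy accumulate-and-break loop by: clean the list, build the
-- prefix sums of the costs, binary-search the largest prefix fitting the budget,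
-- join it (alternative algorithm; costs are strictly positive so this is exact).

-- ===== PORT A =====
-- A's for-loop with `break`: recursion over texts carrying (joined, total).
def pvALoop (max_chars : Int) (sep : String) : List String → List String → Int → List String
  | [], joined, _ => joined
  | t :: rest, joined, total =>
    let t' := PySem.Str.strip t
    if t' = "" then pvALoop max_chars sep rest joined total
    else
      let add : Int := (PySem.Str.len t' : Int) + (PySem.Str.len sep : Int)
      if total + add > max_chars then joined
      else pvALoop max_chars sep rest (joined ++ [t']) (total + add)

def safe_join_texts_py (texts : List String) (max_chars : Int) (sep : String) : String :=
  PySem.Str.join sep (pvALoop max_chars sep texts [] 0)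

-- ===== PORT B =====
-- Source B's prefix-building loop carrying the running total `run` (the returned list
-- is the tail of `prefix` after the initial 0, which the caller conses on).
def pvMkPrefix (sep : String) : Int → List String → List Int
  | _, [] => []
  | run, s :: rest =>
    let r := run + (PySem.Str.len s : Int) + (PySem.Str.len sep : Int)
    r :: pvMkPrefix sep r rest

-- Source B's `while lo < hi` binary-search loop, verbatim.
def pvBSearch (pfx : List Int) (max_chars : Int) (lo hi : Nat) : Nat :=
  if h : lo < hi then
    let mid := (lo + hi + 1) / 2
    if pfx.getD mid 0 ≤ max_chars then pvBSearch pfx max_chars mid hi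
    else pvBSearch pfx max_chars lo (mid - 1)
  else lo
termination_by hi - lo
decreasing_by all_goals omega

def safe_join_texts_py_alt (texts : List String) (max_chars : Int) (sep : String) : String :=
  let cleaned := (texts.map PySem.Str.strip).filter (fun s => s ≠ "")
  let pfx := 0 :: pvMkPrefix sep 0 cleaned
  PySem.Str.join sep (cleaned.take (pvBSearch pfx max_chars 0 cleaned.length))

-- ===== PRECONDITION & SPEC =====
def Spec_safe_join_texts_py (texts : List String) (max_chars : Int) (sep : String) (out : String) : Prop := out = safe_join_texts_py_alt texts max_chars sep
instance (texts : List String) (max_chars : Int) (sep : String) (out : String) : Decidable (Spec_safe_join_texts_py texts max_chars sep out) := by unfold Spec_safe_join_texts_py; infer_instance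

-- ===== CLAIM (what is proved, stated in full; the proofs are below) =====
def Claim_equal_safe_join_texts_py : Prop := ∀ (texts : List String) (max_chars : Int) (sep : String), Dom_safe_join_texts_py texts max_chars sep → Spec_safe_join_texts_py texts max_chars sep (safe_join_texts_py texts max_chars sep)

-- ===== LEMMAS AND PROOFS =====

-- Proof-only counter: the number of leading cleaned items A keeps (the first
-- strict exceedance of the running total). Used only to relate the two ports.
def pvCount (max_chars : Int) (sep : String) : List String → Int → Nat
  | [], _ => 0
  | s :: rest, acc =>
    let c : Int := acc + (PySem.Str.len s : Int) + (PySem.Str.len sep : Int)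
    if c > max_chars then 0 else 1 + pvCount max_chars sep rest c

theorem pvCount_le (max_chars : Int) (sep : String) (cl : List String) :
    ∀ acc, pvCount max_chars sep cl acc ≤ cl.length := by
  induction cl with
  | nil => intro acc; simp [pvCount]
  | cons s rest ih =>
    intro acc
    simp only [pvCount, List.length_cons]
    split_ifs
    · omega
    · have := ih (acc + (PySem.Str.len s : Int) + (PySem.Str.len sep : Int)); omega

theorem pvALoop_eq_take (max_chars : Int) (sep : String) (lst : List String) :
    ∀ (joined : List String) (total : Int),
      pvALoop max_chars sep lst joined total =
        joined ++ (let cl := (lst.map PySem.Str.strip).filter (fun s => s ≠ "");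
          cl.take (pvCount max_chars sep cl total)) := by
  induction lst with
  | nil => intro joined total; simp [pvALoop, pvCount]
  | cons t rest ih =>
    intro joined total
    by_cases h : PySem.Str.strip t = ""
    · simp [pvALoop, h, ih]
    · simp only [pvALoop, List.map_cons, List.filter_cons, decide_eq_true_eq, if_pos h,
        if_neg h, pvCount]
      simp only [PySem.Str.len, PySem.Str.strip] at *
      split_ifs with h1 h2
      · simp
      · omega
      · omega
      · rw [ih]
        have e : total + ((PySem.Chars.strip t.toList).length : Int) + (sep.length : Int)
            = total + (((PySem.Chars.strip t.toList).length : Int) + (sep.length : Int)) := by ring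
        simp [e, Nat.add_comm 1, List.append_assoc]

-- Every entry of the prefix list is ≥ the accumulator (costs are nonnegative).
theorem pvMkPrefix_mono (sep : String) (cl : List String) :
    ∀ acc m, m < cl.length → acc ≤ (pvMkPrefix sep acc cl).getD m 0 := by
  induction cl with
  | nil => intro acc m h; simp at h
  | cons s rest ih =>
    intro acc m h
    simp only [pvMkPrefix, PySem.Str.len_eq]
    cases m with
    | zero =>
      simp only [List.getD_cons_zero]
      omega
    | succ m =>
      simp only [List.getD_cons_succ]
      have h1 := ih (acc + (s.toList.length : Int) + (sep.toList.length : Int)) m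
        (by simpa using Nat.lt_of_succ_lt_succ h)
      omega

-- Characterisation of the prefix sums against pvCount.
theorem pvMkPrefix_le_iff (max_chars : Int) (sep : String) (cl : List String) :
    ∀ acc m, 1 ≤ m → m ≤ cl.length →
      ((pvMkPrefix sep acc cl).getD (m - 1) 0 ≤ max_chars ↔ m ≤ pvCount max_chars sep cl acc) := by
  induction cl with
  | nil => intro acc m h1 h2; simp at h2; omega
  | cons s rest ih =>
    intro acc m h1 h2
    simp only [pvMkPrefix, pvCount, PySem.Str.len_eq]
    set r : Int := acc + (s.toList.length : Int) + (sep.toList.length : Int) with hr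
    rcases Nat.eq_or_lt_of_le h1 with he | hm
    · -- m = 1
      subst he
      simp only [Nat.sub_self, List.getD_cons_zero]
      split_ifs with hc
      · constructor <;> intro h <;> omega
      · constructor <;> intro _ <;> omega
    · -- m ≥ 2
      have hm2 : 2 ≤ m := hm
      have hms : m - 1 = Nat.succ (m - 2) := by omega
      rw [hms, List.getD_cons_succ]
      have hlen : m ≤ rest.length + 1 := by simpa using h2
      split_ifs with hc
      · -- r > max_chars: all later prefix sums ≥ r > max_chars; count = 0
        have hmono := pvMkPrefix_mono sep rest r (m - 2) (by omega)
        constructor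
        · intro h; omega
        · intro h; omega
      · -- r ≤ max_chars: recurse
        have hrec := ih r (m - 1) (by omega) (by omega)
        have e : m - 1 - 1 = m - 2 := by omega
        rw [e] at hrec
        rw [hrec]
        omega

-- Binary search returns N when N is bracketed and the predicate characterises ≤ N.
theorem pvBSearch_eq (pfx : List Int) (mx : Int) (N : Nat) :
    ∀ fuel lo hi, hi - lo ≤ fuel → lo ≤ N → N ≤ hi →
      (∀ m, 1 ≤ m → m ≤ hi → (pfx.getD m 0 ≤ mx ↔ m ≤ N)) →
      pvBSearch pfx mx lo hi = N := by
  intro fuel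
  induction fuel with
  | zero =>
    intro lo hi hf h1 h2 _
    rw [pvBSearch]
    split_ifs with h
    · omega
    · omega
  | succ k ih =>
    intro lo hi hf h1 h2 hp
    by_cases h : lo < hi
    · have hmid1 : 1 ≤ (lo + hi + 1) / 2 := by omega
      have hmidle : (lo + hi + 1) / 2 ≤ hi := by omega
      have hmidgt : lo < (lo + hi + 1) / 2 := by omega
      by_cases hc : pfx.getD ((lo + hi + 1) / 2) 0 ≤ mx
      · rw [pvBSearch]
        simp only [dif_pos h, if_pos hc]
        exact ih _ _ (by omega) ((hp _ hmid1 hmidle).mp hc) h2 hp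
      · have hN : N < (lo + hi + 1) / 2 := by
          by_contra hh
          exact hc ((hp _ hmid1 hmidle).mpr (by omega))
        rw [pvBSearch]
        simp only [dif_pos h, if_neg hc]
        exact ih _ _ (by omega) h1 (by omega)
          (fun m hm1 hm2 => hp m hm1 (by omega))
    · rw [pvBSearch]; simp only [dif_neg h]; omega

-- ===== VERDICT (by name: the statement is the Claim_ definition above) =====
theorem safe_join_texts_py_spec : Claim_equal_safe_join_texts_py := by
  intro texts max_chars sep _
  unfold Spec_safe_join_texts_py safe_join_texts_py safe_join_texts_py_alt
  rw [pvALoop_eq_take]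
  simp only [List.nil_append]
  set cl := (texts.map PySem.Str.strip).filter (fun s => s ≠ "") with hcl
  have hbs : pvBSearch (0 :: pvMkPrefix sep 0 cl) max_chars 0 cl.length
      = pvCount max_chars sep cl 0 := by
    apply pvBSearch_eq _ _ _ cl.length 0 cl.length (by omega) (by omega) (pvCount_le _ _ _ _)
    intro m hm1 hm2
    have : (0 :: pvMkPrefix sep 0 cl).getD m 0 = (pvMkPrefix sep 0 cl).getD (m - 1) 0 := by
      cases m with
      | zero => omega
      | succ m => simp
    rw [this]
    exact pvMkPrefix_le_iff max_chars sep cl 0 m hm1 hm2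
  rw [hbs]
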